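-- pv_equiv track=rewrite | github.com/dLCamm/Simulador-Analizador-L-xico | analizador.py | generar_reporte
-- ===== SOURCE A (Python) =====
-- from collections import Counter
--
-- def generar_reporte(tokens):
--     contador_tokens = Counter((token, tipo) for token, tipo, _ in tokens)
--
--     reporte = "REPORTE DE TOKENS - ANALIZADOR LÉXICO (PSEINT)\n"
--     reporte += "=" * 65 + "\n\n"
--
--     reporte += "TOKENS ENCONTRADOS (CLASIFICADOS POR TIPO Y CANTIDAD):\n"
--     reporte += "=" * 70 + "\n\n"
--
--     reporte += f"{'TOKEN':<20} {'TIPO':<25} {'CANTIDAD':<10}\n"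
--     reporte += "-" * 55 + "\n"
--
--     tokens_ordenados = sorted(contador_tokens.items(), key=lambda x: (x[0][1], x[0][0]))
--
--     for (token, tipo), cantidad in tokens_ordenados:
--         reporte += f"{token:<20} {tipo:<25} {cantidad:<10}\n"
--
--     contador_tipos = Counter(tipo for _, tipo, _ in tokens)
--
--     reporte += "\n" + "=" * 55 + "\n"
--     reporte += "RESUMEN POR TIPO DE TOKEN:\n"
--     reporte += "-" * 40 + "\n"
--
--     for tipo, cantidad in contador_tipos.items():
--         reporte += f"{tipo}: {cantidad} tokens\n"
--
--     tokens_validos = [t for t in tokens if t[1] != "DESCONOCIDO"]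
--     tokens_no_reconocidos = [t for t in tokens if t[1] == "DESCONOCIDO"]
--
--     reporte += "\n" + "=" * 55 + "\n"
--     reporte += f"TOTAL DE TOKENS VÁLIDOS: {len(tokens_validos)}\n"
--     reporte += f"TOTAL DE TOKENS NO RECONOCIDOS: {len(tokens_no_reconocidos)}\n"
--     reporte += f"TOTAL GENERAL: {len(tokens)}\n"
--
--     if tokens_no_reconocidos:
--         reporte += "\nTOKENS NO RECONOCIDOS (ERRORES LÉXICOS):\n"
--         reporte += "-" * 45 + "\n"
--         errores_por_linea = {}
--         for token, tipo, linea in tokens_no_reconocidos: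
--             if linea not in errores_por_linea:
--                 errores_por_linea[linea] = []
--             errores_por_linea[linea].append(token)
--
--         for linea in sorted(errores_por_linea.keys()):
--             tokens_error = errores_por_linea[linea]
--             tokens_str = ', '.join([f'"{t}"' for t in tokens_error])
--             reporte += f"Línea {linea}: {tokens_str}\n"
--
--     return reporte
-- ===== SOURCE B (Python) =====
-- def generar_reporte(tokens):
--     # One pass over tokens fills all counters/groupings at once; the report is
--     # then assembled as a list of parts joined at the end.
--     pares = {}
--     tipos = {}
--     validos = 0
--     errores = 0
--     errores_por_linea = {}
--     for token, tipo, linea in tokens: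
--         pares[(token, tipo)] = pares.get((token, tipo), 0) + 1
--         tipos[tipo] = tipos.get(tipo, 0) + 1
--         if tipo == "DESCONOCIDO":
--             errores += 1
--             errores_por_linea.setdefault(linea, []).append(token)
--         else:
--             validos += 1
--
--     filas = [f"{token:<20} {tipo:<25} {cantidad:<10}\n"
--              for (token, tipo), cantidad in
--              sorted(pares.items(), key=lambda x: (x[0][1], x[0][0]))]
--     resumen = [f"{tipo}: {cantidad} tokens\n" for tipo, cantidad in tipos.items()]
--
--     partes = [
--         "REPORTE DE TOKENS - ANALIZADOR LÉXICO (PSEINT)\n",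
--         "=" * 65 + "\n\n",
--         "TOKENS ENCONTRADOS (CLASIFICADOS POR TIPO Y CANTIDAD):\n",
--         "=" * 70 + "\n\n",
--         f"{'TOKEN':<20} {'TIPO':<25} {'CANTIDAD':<10}\n",
--         "-" * 55 + "\n",
--         "".join(filas),
--         "\n" + "=" * 55 + "\n",
--         "RESUMEN POR TIPO DE TOKEN:\n",
--         "-" * 40 + "\n",
--         "".join(resumen),
--         "\n" + "=" * 55 + "\n",
--         f"TOTAL DE TOKENS VÁLIDOS: {validos}\n",
--         f"TOTAL DE TOKENS NO RECONOCIDOS: {errores}\n",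
--         f"TOTAL GENERAL: {validos + errores}\n",
--     ]
--     if errores:
--         partes.append("\nTOKENS NO RECONOCIDOS (ERRORES LÉXICOS):\n")
--         partes.append("-" * 45 + "\n")
--         for linea in sorted(errores_por_linea):
--             tokens_str = ', '.join(f'"{t}"' for t in errores_por_linea[linea])
--             partes.append(f"Línea {linea}: {tokens_str}\n")
--     return "".join(partes)
-- ===== Notes on version B (the rewrite author's own statement) =====
-- stated objective: alternative
-- what changed: A's five separate passes over the token list (two Counters, two filters, one grouping loop) are fused into a single pass that maintains all counters, the valid/unknown tallies and the per-line error grouping at once, and the report is assembled as a list of parts joined at the end instead of repeated string +=.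
import Mathlib
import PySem

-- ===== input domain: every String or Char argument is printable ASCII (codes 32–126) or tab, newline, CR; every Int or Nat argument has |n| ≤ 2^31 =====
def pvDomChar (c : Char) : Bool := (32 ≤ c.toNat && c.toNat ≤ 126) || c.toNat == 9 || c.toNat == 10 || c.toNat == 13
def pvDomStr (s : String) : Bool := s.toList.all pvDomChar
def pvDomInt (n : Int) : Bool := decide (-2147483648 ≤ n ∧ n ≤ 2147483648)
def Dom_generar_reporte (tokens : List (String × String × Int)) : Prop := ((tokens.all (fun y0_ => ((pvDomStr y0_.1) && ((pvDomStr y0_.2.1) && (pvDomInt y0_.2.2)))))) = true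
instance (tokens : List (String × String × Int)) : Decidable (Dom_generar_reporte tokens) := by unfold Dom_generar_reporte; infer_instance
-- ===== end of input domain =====

-- B replaces A's five separate passes over the token list by one fused pass that fills every
-- counter/grouping at once, and assembles the report from a list of parts joined at the end
-- (objective: alternative decomposition, same cost).

-- shared formatting helpers (both Pythons use the same f-strings / "c" * n literals)
-- "c" * n  (string repetition)
def pvRep (c : Char) (n : Nat) : String := String.ofList (List.replicate n c)
-- f"{s:<w}"  (left-justify: pad with spaces to width w, Python counts code points)
def pvPad (s : String) (w : Nat) : String := s ++ String.ofList (List.replicate (w - s.toList.length) ' ')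
-- f"{token:<20} {tipo:<25} {cantidad:<10}\n"
def pvRow (token tipo : String) (cantidad : Int) : String :=
  pvPad token 20 ++ " " ++ pvPad tipo 25 ++ " " ++ pvPad (PySem.Int.toStr cantidad) 10 ++ "\n"
-- f"{tipo}: {cantidad} tokens\n"
def pvResumenLine (tipo : String) (cantidad : Int) : String :=
  tipo ++ ": " ++ PySem.Int.toStr cantidad ++ " tokens\n"
-- f"Línea {linea}: {', '.join(f'\"{t}\"' for t in ts)}\n"
def pvErrLine (linea : Int) (ts : List String) : String :=
  "Línea " ++ PySem.Int.toStr linea ++ ": " ++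
    PySem.Str.join ", " (ts.map (fun t => "\"" ++ t ++ "\"")) ++ "\n"

-- ===== PORT A =====
def generar_reporte (tokens : List (String × String × Int)) : String :=
  let contador_tokens := PySem.Dict.counter (tokens.map (fun t => (t.1, t.2.1)))
  let reporte := "REPORTE DE TOKENS - ANALIZADOR LÉXICO (PSEINT)\n"
  let reporte := reporte ++ pvRep '=' 65 ++ "\n\n"
  let reporte := reporte ++ "TOKENS ENCONTRADOS (CLASIFICADOS POR TIPO Y CANTIDAD):\n"
  let reporte := reporte ++ pvRep '=' 70 ++ "\n\n"
  let reporte := reporte ++ pvPad "TOKEN" 20 ++ " " ++ pvPad "TIPO" 25 ++ " " ++ pvPad "CANTIDAD" 10 ++ "\n"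
  let reporte := reporte ++ pvRep '-' 55 ++ "\n"
  let tokens_ordenados := PySem.List.sorted2 contador_tokens.items (fun x => x.1.2) (fun x => x.1.1)
  let reporte := tokens_ordenados.foldl (fun r x => r ++ pvRow x.1.1 x.1.2 x.2) reporte
  let contador_tipos := PySem.Dict.counter (tokens.map (fun t => t.2.1))
  let reporte := reporte ++ "\n" ++ pvRep '=' 55 ++ "\n"
  let reporte := reporte ++ "RESUMEN POR TIPO DE TOKEN:\n"
  let reporte := reporte ++ pvRep '-' 40 ++ "\n"
  let reporte := contador_tipos.items.foldl (fun r x => r ++ pvResumenLine x.1 x.2) reporte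
  let tokens_validos := tokens.filter (fun t => !(t.2.1 == "DESCONOCIDO"))
  let tokens_no_reconocidos := tokens.filter (fun t => t.2.1 == "DESCONOCIDO")
  let reporte := reporte ++ "\n" ++ pvRep '=' 55 ++ "\n"
  let reporte := reporte ++ "TOTAL DE TOKENS VÁLIDOS: " ++ PySem.Int.toStr (tokens_validos.length : Int) ++ "\n"
  let reporte := reporte ++ "TOTAL DE TOKENS NO RECONOCIDOS: " ++ PySem.Int.toStr (tokens_no_reconocidos.length : Int) ++ "\n"
  let reporte := reporte ++ "TOTAL GENERAL: " ++ PySem.Int.toStr (tokens.length : Int) ++ "\n"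
  if tokens_no_reconocidos.isEmpty then reporte
  else
    let reporte := reporte ++ "\nTOKENS NO RECONOCIDOS (ERRORES LÉXICOS):\n"
    let reporte := reporte ++ pvRep '-' 45 ++ "\n"
    -- 'if linea not in d: d[linea] = []; d[linea].append(token)' = Dict.modify linea [] (· ++ [token])
    let errores_por_linea := tokens_no_reconocidos.foldl
      (fun d t => d.modify t.2.2 [] (· ++ [t.1])) PySem.Dict.empty
    (PySem.List.sorted errores_por_linea.keys (fun x => x) false).foldl
      (fun r linea => r ++ pvErrLine linea (errores_por_linea.getD linea [])) reporte

-- ===== PORT B =====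
-- the fused loop body of Source B: state = (pares, tipos, validos, errores, errores_por_linea)
def pvState : Type :=
  PySem.Dict (String × String) Int × PySem.Dict String Int × Int × Int × PySem.Dict Int (List String)
def pvStep (s : pvState) (x : String × String × Int) : pvState :=
  let pares := s.1.insert (x.1, x.2.1) (s.1.getD (x.1, x.2.1) 0 + 1)
  let tipos := s.2.1.insert x.2.1 (s.2.1.getD x.2.1 0 + 1)
  if x.2.1 == "DESCONOCIDO" then
    -- setdefault(linea, []).append(token)
    (pares, tipos, s.2.2.1, s.2.2.2.1 + 1, s.2.2.2.2.modify x.2.2 [] (· ++ [x.1]))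
  else
    (pares, tipos, s.2.2.1 + 1, s.2.2.2.1, s.2.2.2.2)

def generar_reporte_alt (tokens : List (String × String × Int)) : String :=
  let st := tokens.foldl pvStep (PySem.Dict.empty, PySem.Dict.empty, 0, 0, PySem.Dict.empty)
  let pares := st.1
  let tipos := st.2.1
  let validos := st.2.2.1
  let errores := st.2.2.2.1
  let errores_por_linea := st.2.2.2.2
  let filas := (PySem.List.sorted2 pares.items (fun x => x.1.2) (fun x => x.1.1)).map
    (fun x => pvRow x.1.1 x.1.2 x.2)
  let resumen := tipos.items.map (fun x => pvResumenLine x.1 x.2)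
  let partes : List String := [
    "REPORTE DE TOKENS - ANALIZADOR LÉXICO (PSEINT)\n",
    pvRep '=' 65 ++ "\n\n",
    "TOKENS ENCONTRADOS (CLASIFICADOS POR TIPO Y CANTIDAD):\n",
    pvRep '=' 70 ++ "\n\n",
    pvPad "TOKEN" 20 ++ " " ++ pvPad "TIPO" 25 ++ " " ++ pvPad "CANTIDAD" 10 ++ "\n",
    pvRep '-' 55 ++ "\n",
    PySem.Str.join "" filas,
    "\n" ++ pvRep '=' 55 ++ "\n",
    "RESUMEN POR TIPO DE TOKEN:\n",
    pvRep '-' 40 ++ "\n",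
    PySem.Str.join "" resumen,
    "\n" ++ pvRep '=' 55 ++ "\n",
    "TOTAL DE TOKENS VÁLIDOS: " ++ PySem.Int.toStr validos ++ "\n",
    "TOTAL DE TOKENS NO RECONOCIDOS: " ++ PySem.Int.toStr errores ++ "\n",
    "TOTAL GENERAL: " ++ PySem.Int.toStr (validos + errores) ++ "\n"]
  let partes := if errores == 0 then partes else
    partes ++ ["\nTOKENS NO RECONOCIDOS (ERRORES LÉXICOS):\n", pvRep '-' 45 ++ "\n"] ++
      (PySem.List.sorted errores_por_linea.keys (fun x => x) false).map
        (fun linea => pvErrLine linea (errores_por_linea.getD linea []))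
  PySem.Str.join "" partes

-- ===== PRECONDITION & SPEC =====
def Spec_generar_reporte (tokens : List (String × String × Int)) (out : String) : Prop := out = generar_reporte_alt tokens
instance (tokens : List (String × String × Int)) (out : String) : Decidable (Spec_generar_reporte tokens out) := by unfold Spec_generar_reporte; infer_instance

-- ===== CLAIM (what is proved, stated in full; the proofs are below) =====
def Claim_equal_generar_reporte : Prop := ∀ (tokens : List (String × String × Int)), Dom_generar_reporte tokens → Spec_generar_reporte tokens (generar_reporte tokens)

-- ===== LEMMAS AND PROOFS =====

-- ''.join(x :: xs) peels one part off
theorem pv_join_nil : PySem.Str.join "" ([] : List String) = "" := rfl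

theorem pv_flatten_intersperse_nil (l : List (List Char)) :
    (List.intersperse [] l).flatten = l.flatten := by
  induction l with
  | nil => rfl
  | cons a t ih => cases t <;> simp_all [List.intersperse]

theorem pv_join_cons (x : String) (xs : List String) :
    PySem.Str.join "" (x :: xs) = x ++ PySem.Str.join "" xs := by
  apply String.toList_inj.mp
  simp [PySem.Str.join, PySem.Chars.join, List.intercalate, pv_flatten_intersperse_nil]

-- a += loop over l appending f x is base ++ ''.join(map f l)
theorem pv_foldl_append (f : α → String) (l : List α) (base : String) :
    l.foldl (fun r x => r ++ f x) base = base ++ PySem.Str.join "" (l.map f) := by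
  induction l generalizing base with
  | nil => simp [pv_join_nil]
  | cons x xs ih => simp [ih, pv_join_cons, String.append_assoc]

-- the fused single pass of B equals the five independent passes of A
theorem pv_step_split (tokens : List (String × String × Int))
    (p : PySem.Dict (String × String) Int) (t : PySem.Dict String Int) (v e : Int)
    (d : PySem.Dict Int (List String)) :
    tokens.foldl pvStep (p, t, v, e, d) =
      (tokens.foldl (fun d x => d.insert (x.1, x.2.1) (d.getD (x.1, x.2.1) 0 + 1)) p,
       tokens.foldl (fun d x => d.insert x.2.1 (d.getD x.2.1 0 + 1)) t,
       v + (tokens.countP (fun x => !(x.2.1 == "DESCONOCIDO")) : Int),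
       e + (tokens.countP (fun x => x.2.1 == "DESCONOCIDO") : Int),
       (tokens.filter (fun x => x.2.1 == "DESCONOCIDO")).foldl
         (fun d x => d.modify x.2.2 [] (· ++ [x.1])) d) := by
  induction tokens generalizing p t v e d with
  | nil => simp
  | cons x xs ih =>
    by_cases h : x.2.1 = "DESCONOCIDO" <;>
      simp [pvStep, h, ih] <;> ring_nf

-- B's insert-based counting loop is A's Counter
theorem pv_counter_pairs (tokens : List (String × String × Int)) :
    tokens.foldl (fun d x => d.insert (x.1, x.2.1) (d.getD (x.1, x.2.1) 0 + 1)) PySem.Dict.empty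
      = PySem.Dict.counter (tokens.map (fun t => (t.1, t.2.1))) := by
  rw [← PySem.Dict.foldl_insert_getD_add_one_eq_counter, List.foldl_map]

theorem pv_counter_tipos (tokens : List (String × String × Int)) :
    tokens.foldl (fun d x => d.insert x.2.1 (d.getD x.2.1 0 + 1)) PySem.Dict.empty
      = PySem.Dict.counter (tokens.map (fun t => t.2.1)) := by
  rw [← PySem.Dict.foldl_insert_getD_add_one_eq_counter, List.foldl_map]

theorem pv_count_valid (tokens : List (String × String × Int)) :
    (tokens.countP (fun x => !(x.2.1 == "DESCONOCIDO")) : Int)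
      = ((tokens.filter (fun t => !(t.2.1 == "DESCONOCIDO"))).length : Int) := by
  simp [List.countP_eq_length_filter]

theorem pv_count_desc (tokens : List (String × String × Int)) :
    (tokens.countP (fun x => x.2.1 == "DESCONOCIDO") : Int)
      = ((tokens.filter (fun t => t.2.1 == "DESCONOCIDO")).length : Int) := by
  simp [List.countP_eq_length_filter]

theorem pv_total (tokens : List (String × String × Int)) :
    (tokens.countP (fun x => !(x.2.1 == "DESCONOCIDO")) : Int)
      + (tokens.countP (fun x => x.2.1 == "DESCONOCIDO") : Int)
      = (tokens.length : Int) := by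
  induction tokens with
  | nil => simp
  | cons x xs ih =>
    by_cases h : x.2.1 = "DESCONOCIDO" <;> simp [h] <;> omega

-- ===== VERDICT (by name: the statement is the Claim_ definition above) =====
theorem generar_reporte_spec : Claim_equal_generar_reporte := by
  intro tokens _
  show generar_reporte tokens = generar_reporte_alt tokens
  have hgate : (((tokens.countP (fun x => x.2.1 == "DESCONOCIDO") : Int)) == 0)
      = (tokens.filter (fun t => t.2.1 == "DESCONOCIDO")).isEmpty := by
    rw [show ((tokens.countP (fun x => x.2.1 == "DESCONOCIDO") : Int))
        = ((tokens.filter (fun x => x.2.1 == "DESCONOCIDO")).length : Int) by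
      simp [List.countP_eq_length_filter]]
    cases hfe : tokens.filter (fun x => x.2.1 == "DESCONOCIDO") with
    | nil => simp
    | cons a l => simp; omega
  simp only [generar_reporte, generar_reporte_alt, pv_step_split, pv_counter_pairs,
    pv_counter_tipos, zero_add]
  rw [pv_foldl_append, pv_foldl_append, ← pv_count_valid, ← pv_count_desc, pv_total, hgate]
  by_cases hc : (tokens.filter (fun t => t.2.1 == "DESCONOCIDO")).isEmpty = true
  · simp only [hc, if_true]
    apply String.toList_inj.mp
    simp [pv_join_cons, String.append_assoc]
  · simp only [Bool.not_eq_true] at hc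
    simp only [hc, Bool.false_eq_true, if_false]
    rw [pv_foldl_append]
    apply String.toList_inj.mp
    simp [pv_join_cons, String.append_assoc]
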